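-- pv_equiv track=rewrite | github.com/aviswerdlow/k4 | archive/experiments/flint_otp_traverse/build_keystreams.py | generate
-- ===== SOURCE A (Python) =====
-- from typing import Dict, List, Tuple
--
-- def generate(digit_stream: str, params: Dict) -> List[int]:
--     """Map each digit with optional offset"""
--     offset = params.get("offset", 0)
--     keystream = []
--
--     for i in range(97):
--         if i < len(digit_stream):
--             d = int(digit_stream[i])
--             k = (d + offset) % 26
--         else:
--             # Cycle from beginning if stream too short
--             idx = i % len(digit_stream) if digit_stream else 0
--             d = int(digit_stream[idx]) if digit_stream else 0
--             k = (d + offset) % 26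
--         keystream.append(k)
--
--     return keystream
-- ===== SOURCE B (Python) =====
-- def generate(digit_stream: str, params) -> list:
--     """Map each digit with optional offset (map table, then tile to 97)."""
--     offset = params.get("offset", 0)
--     mapped = [(int(c) + offset) % 26 for c in digit_stream[:97]]
--     if not mapped:
--         return [offset % 26] * 97
--     repeat = -(-97 // len(mapped))
--     return (mapped * repeat)[:97]
-- ===== Notes on version B (the rewrite author's own statement) =====
-- stated objective: simpler
-- what changed: B precomputes the mapped-digit table for the first min(len,97) characters in one pass, then tiles it ceil(97/len) times and truncates to 97, replacing A's single 97-iteration loop with a per-index length test and cycle modulo.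
import Mathlib
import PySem

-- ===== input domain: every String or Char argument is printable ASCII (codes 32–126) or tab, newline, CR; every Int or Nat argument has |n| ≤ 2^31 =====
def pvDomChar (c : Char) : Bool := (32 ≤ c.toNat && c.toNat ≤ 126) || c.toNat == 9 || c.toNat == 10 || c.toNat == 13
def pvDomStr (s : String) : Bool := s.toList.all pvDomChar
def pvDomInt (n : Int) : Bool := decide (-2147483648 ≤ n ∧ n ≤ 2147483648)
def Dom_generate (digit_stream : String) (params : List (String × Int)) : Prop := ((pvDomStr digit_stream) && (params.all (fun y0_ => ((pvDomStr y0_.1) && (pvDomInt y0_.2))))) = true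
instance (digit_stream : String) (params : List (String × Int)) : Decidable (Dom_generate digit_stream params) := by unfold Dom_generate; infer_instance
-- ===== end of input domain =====

-- B replaces A's 97-step loop (per-index branch + cycle modulo) by one map over the first
-- min(len,97) digits followed by tile-and-truncate to 97 entries; objective: simpler.

-- int(ch) for a one-character string; Pre_ guarantees the parse succeeds (exact there)
def pyInt1 (c : Char) : Int := (PySem.Int.ofStr? (String.mk [c])).getD 0

-- ===== PORT A =====
def generate (digit_stream : String) (params : List (String × Int)) : List Int :=
  let offset := PySem.Dict.getD (PySem.Dict.mk params) "offset" 0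
  (PySem.List.pyRange 0 97 1).foldl (fun keystream i =>
    let k :=
      if i < PySem.Str.len digit_stream then
        let d := ((PySem.Str.pyGet? digit_stream i).map pyInt1).getD 0
        PySem.Int.mod (d + offset) 26
      else
        let idx : Int := if digit_stream.toList ≠ [] then PySem.Int.mod i (PySem.Str.len digit_stream) else 0
        let d : Int := if digit_stream.toList ≠ [] then ((PySem.Str.pyGet? digit_stream idx).map pyInt1).getD 0 else 0
        PySem.Int.mod (d + offset) 26
    keystream ++ [k]) []

-- ===== PORT B =====
def generate_alt (digit_stream : String) (params : List (String × Int)) : List Int :=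
  let offset := PySem.Dict.getD (PySem.Dict.mk params) "offset" 0
  let mapped := (PySem.List.slice digit_stream.toList none (some 97)).map
    (fun c => PySem.Int.mod (pyInt1 c + offset) 26)
  if mapped = [] then
    List.replicate 97 (PySem.Int.mod offset 26)
  else
    let rep : Int := -(PySem.Int.floordiv (-97) (mapped.length : Int))
    PySem.List.slice ((List.replicate rep.toNat mapped).flatten) none (some 97)

-- ===== PRECONDITION & SPEC =====
-- Pre_ excludes streams whose first min(len,97) characters contain a non-digit: there
-- int() raises ValueError in A (characters past index 96 are never read by A).
def Pre_generate (digit_stream : String) (params : List (String × Int)) : Prop :=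
  (digit_stream.toList.take 97).all Char.isDigit = true
instance (digit_stream : String) (params : List (String × Int)) : Decidable (Pre_generate digit_stream params) := by unfold Pre_generate; infer_instance
def pvWitness_generate : String × (List (String × Int)) := ("3141592", [("offset", 7)])

def Spec_generate (digit_stream : String) (params : List (String × Int)) (out : List Int) : Prop := out = generate_alt digit_stream params
instance (digit_stream : String) (params : List (String × Int)) (out : List Int) : Decidable (Spec_generate digit_stream params out) := by unfold Spec_generate; infer_instance

-- ===== CLAIM (what is proved, stated in full; the proofs are below) =====
def Claim_equal_generate : Prop := ∀ (digit_stream : String) (params : List (String × Int)), Dom_generate digit_stream params → Pre_generate digit_stream params → Spec_generate digit_stream params (generate digit_stream params)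

-- ===== LEMMAS AND PROOFS =====

lemma getElem?_flatten_replicate {α : Type} (xs : List α) (m k : Nat)
    (hk : k < m * xs.length) :
    ((List.replicate m xs).flatten)[k]? = xs[k % xs.length]? := by
  induction m generalizing k with
  | zero => omega
  | succ m ih =>
    rw [List.replicate_succ, List.flatten_cons]
    rw [Nat.succ_mul] at hk
    by_cases h : k < xs.length
    · rw [List.getElem?_append_left h, Nat.mod_eq_of_lt h]
    · push_neg at h
      rw [List.getElem?_append_right h, ih (k - xs.length) (by omega)]
      congr 1
      conv_rhs => rw [show k = xs.length + (k - xs.length) by omega, Nat.add_mod_left]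

lemma slice_to_97 {α : Type} (xs : List α) :
    PySem.List.slice xs none (some (97:Int)) = xs.take 97 := by
  rw [PySem.List.slice_to xs (by norm_num)]
  rfl

-- ===== VERDICT (by name: the statement is the Claim_ definition above) =====
theorem generate_spec : Claim_equal_generate := by
  intro ds params _ _
  show generate ds params = generate_alt ds params
  unfold generate generate_alt
  simp only [PySem.List.foldl_append_singleton_eq_map, List.nil_append,
    PySem.Str.len_eq, PySem.Str.pyGet?, PySem.Chars.pyGet?, slice_to_97]
  set off := PySem.Dict.getD (PySem.Dict.mk params) "offset" 0 with hoff
  cases hcs : ds.toList with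
  | nil =>
      simp only [List.take_nil, List.map_nil, if_true]
      rw [List.eq_replicate_iff]
      constructor
      · simp [PySem.List.length_pyRange_one]
      · intro b hb
        obtain ⟨i, hi, rfl⟩ := List.mem_map.mp hb
        have hi' := (PySem.List.mem_pyRange_one).mp hi
        simp only [List.length_nil, Nat.cast_zero, if_neg (by omega : ¬ i < (0:Int)),
          ne_eq, not_true_eq_false, if_false, zero_add]
  | cons c t =>
      set cs : List Char := c :: t with hcsdef
      set g : Char → Int := fun ch => PySem.Int.mod (pyInt1 ch + off) 26 with hg
      have hne : cs ≠ [] := by simp [hcsdef]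
      have hlenpos : 0 < cs.length := by simp [hcsdef]
      have hmne : (cs.take 97).map g ≠ [] := by
        simp [List.take_eq_nil_iff, hne]
      rw [if_neg hmne]
      set ts := (cs.take 97).map g with hts
      set m := ts.length with hmdef
      have hm' : m = min 97 cs.length := by simp [hmdef, hts, List.length_take]
      have hmpos : 0 < m := by omega
      have hmle : m ≤ 97 := by omega
      have hmint : (0:Int) < (m:Int) := by exact_mod_cast hmpos
      rw [PySem.Int.floordiv_eq_ediv_of_pos hmint]
      set q : Int := (-97) / (m:Int) with hqdef
      have hemod1 : 0 ≤ (-97:Int) % (m:Int) := Int.emod_nonneg _ (by omega)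
      have hdm := Int.ediv_add_emod (-97:Int) (m:Int)
      have hqneg : q < 0 := by
        by_contra hq
        push_neg at hq
        have hnn : 0 ≤ (m:Int) * q := mul_nonneg hmint.le hq
        linarith [hdm, hemod1]
      have h3 : (-q) * (m:Int) = 97 + (-97:Int) % (m:Int) := by
        ring_nf; linarith [hdm]
      have hkey : 97 ≤ (-q).toNat * m := by
        have hcast : ((-q).toNat * m : Int) = (-q) * (m:Int) := by
          push_cast [Int.toNat_of_nonneg (by omega : (0:Int) ≤ -q)]; ring
        have h4 : (97:Int) ≤ ((-q).toNat * m : Int) := by rw [hcast, h3]; linarith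
        exact_mod_cast h4
      apply List.ext_getElem?
      intro k
      rw [List.getElem?_map, PySem.List.getElem?_pyRange_one, List.getElem?_take]
      by_cases hk : k < 97
      · rw [if_pos (by omega), if_pos hk,
          getElem?_flatten_replicate ts (-q).toNat k (by rw [← hmdef]; omega)]
        have hkm : k % m < m := Nat.mod_lt _ hmpos
        have hget : ts[k % m]? = some (g cs[k % m]) := by
          rw [hts, List.getElem?_map, List.getElem?_take, if_pos (by omega),
            List.getElem?_eq_getElem (by omega)]
          rfl
        rw [hget, Option.map_some]
        congr 1
        by_cases hkn : k < cs.length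
        · rw [if_pos (by omega)]
          have hpg : PySem.List.pyGet? cs ((0:Int) + (k:Int)) = some cs[k] := by
            rw [zero_add, PySem.List.pyGet?_natCast, List.getElem?_eq_getElem hkn]
          rw [hpg]
          have hkmk : k % m = k := Nat.mod_eq_of_lt (by omega)
          simp [hg, hkmk]
        · rw [if_neg (by push_cast; omega), if_pos hne, if_pos hne]
          have hmn : m = cs.length := by omega
          have hmod : PySem.Int.mod ((0:Int) + (k:Int)) (cs.length : Int)
              = ((k % cs.length : Nat) : Int) := by
            rw [zero_add]; exact_mod_cast PySem.Int.mod_natCast k cs.length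
          rw [hmod, PySem.List.pyGet?_natCast,
            List.getElem?_eq_getElem (Nat.mod_lt _ hlenpos)]
          simp [hg, hmn]
      · rw [if_neg (by omega), if_neg hk]
        rfl
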